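-- pv_equiv track=rewrite | github.com/msadasivam/apigee-migration-assessment-tool | utils.py | bundle_path
-- ===== SOURCE A (Python) =====
-- def bundle_path(each_group_bundle):
--     """Bundles API paths within each group.
--
--
--     Args:
--         each_group_bundle: List of API path groups.
--
--     Returns:
--         List of bundled API paths.
--     """
--     outer_group = []
--     for each_group in each_group_bundle:
--         subgroups = {}
--         for each_pe in each_group:
--             path = list(each_pe.values())[0]
--             proxy_ep = list(each_pe.keys())[0]
--             if path in subgroups:
--                 subgroups[path].append(proxy_ep)
--             else:
--                 subgroups[path] = [proxy_ep]
--         outer_group.append(subgroups)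
--     return outer_group
-- ===== SOURCE B (Python) =====
-- def bundle_path(each_group_bundle):
--     """Bundles API paths within each group (distinct-path pass + per-path filter)."""
--     outer_group = []
--     for each_group in each_group_bundle:
--         pairs = [(list(pe.values())[0], list(pe.keys())[0]) for pe in each_group]
--         seen = dict.fromkeys(p for p, _ in pairs)
--         outer_group.append({p: [ep for q, ep in pairs if q == p] for p in seen})
--     return outer_group
-- ===== Notes on version B (the rewrite author's own statement) =====
-- stated objective: alternative
-- what changed: Replaces the streaming dict aggregation (check membership, append or create per element) with a two-pass decomposition: extract all (path, proxy) pairs, take the distinct paths in first-occurrence order, then build each subgroup by filtering the pairs per path.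
import Mathlib
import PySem

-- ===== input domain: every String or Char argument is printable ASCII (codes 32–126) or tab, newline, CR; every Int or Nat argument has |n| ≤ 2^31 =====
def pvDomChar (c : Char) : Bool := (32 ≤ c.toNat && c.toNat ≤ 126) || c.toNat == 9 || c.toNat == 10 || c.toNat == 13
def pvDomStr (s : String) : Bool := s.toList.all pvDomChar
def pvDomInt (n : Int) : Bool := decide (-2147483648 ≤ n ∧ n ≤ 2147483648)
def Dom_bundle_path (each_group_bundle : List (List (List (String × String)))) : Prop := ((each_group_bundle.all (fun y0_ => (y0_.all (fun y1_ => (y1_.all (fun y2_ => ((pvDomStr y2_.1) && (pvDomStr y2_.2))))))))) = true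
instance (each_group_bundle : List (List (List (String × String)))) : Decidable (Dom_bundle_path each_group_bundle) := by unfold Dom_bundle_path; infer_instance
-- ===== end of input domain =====

-- B replaces A's streaming dict aggregation with a distinct-paths pass plus a per-path filter (alternative decomposition, same results).


-- ===== PORT A =====
-- each_pe is a Python dict: list(each_pe.values())[0] / list(each_pe.keys())[0]; headD "" stands for the
-- IndexError on an empty dict (excluded by Pre_).
def bundle_path (each_group_bundle : List (List (List (String × String)))) : List (List (String × List String)) :=
  each_group_bundle.foldl
    (fun outer_group each_group =>
      let subgroups : PySem.Dict String (List String) :=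
        each_group.foldl
          (fun d each_pe =>
            let dpe := PySem.Dict.ofList each_pe
            let path := dpe.values.headD ""
            let proxy_ep := dpe.keys.headD ""
            if d.contains path then d.modify path [] (fun l => l ++ [proxy_ep])
            else d.insert path [proxy_ep])
          PySem.Dict.empty
      outer_group ++ [subgroups.items])
    []

-- ===== PORT B =====
def bundle_path_alt (each_group_bundle : List (List (List (String × String)))) : List (List (String × List String)) :=
  each_group_bundle.map
    (fun each_group =>
      let pairs := each_group.map
        (fun pe =>
          let dpe := PySem.Dict.ofList pe
          (dpe.values.headD "", dpe.keys.headD ""))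
      let seen := PySem.List.dedup (pairs.map (·.1))
      seen.map (fun p => (p, (pairs.filter (fun q => q.1 == p)).map (·.2))))

-- ===== PRECONDITION & SPEC =====
-- Pre_ excludes inner empty dicts, on which A (and B) raise IndexError at list(each_pe.values())[0].
def Pre_bundle_path (each_group_bundle : List (List (List (String × String)))) : Prop :=
  ∀ g ∈ each_group_bundle, ∀ pe ∈ g, pe ≠ []
instance (each_group_bundle : List (List (List (String × String)))) : Decidable (Pre_bundle_path each_group_bundle) := by unfold Pre_bundle_path; infer_instance
def pvWitness_bundle_path : (List (List (List (String × String)))) :=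
  [[[("ep1", "/a")], [("ep2", "/a")], [("ep3", "/b")]], [[("ep4", "/c")]]]

def Spec_bundle_path (each_group_bundle : List (List (List (String × String)))) (out : List (List (String × List String))) : Prop := out = bundle_path_alt each_group_bundle
instance (each_group_bundle : List (List (List (String × String)))) (out : List (List (String × List String))) : Decidable (Spec_bundle_path each_group_bundle out) := by unfold Spec_bundle_path; infer_instance

-- ===== CLAIM (what is proved, stated in full; the proofs are below) =====
def Claim_equal_bundle_path : Prop := ∀ (each_group_bundle : List (List (List (String × String)))), Dom_bundle_path each_group_bundle → Pre_bundle_path each_group_bundle → Spec_bundle_path each_group_bundle (bundle_path each_group_bundle)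

-- ===== LEMMAS AND PROOFS =====

-- A's branch is exactly Dict.modify (modify on an absent key appends, like insert).
lemma step_eq_modify (d : PySem.Dict String (List String)) (p ep : String) :
    (if d.contains p then d.modify p [] (fun l => l ++ [ep]) else d.insert p [ep])
      = d.modify p [] (fun l => l ++ [ep]) := by
  by_cases h : d.contains p
  · simp [h]
  · have h' : d.contains p = false := by simpa using h
    simp only [h', Bool.false_eq_true, if_false]
    apply PySem.Dict.ext
    simp [PySem.Dict.modify, PySem.Dict.insert, h']
    exact PySem.Dict.getD_of_not_contains d [] h'

-- A's inner loop, as items, is B's subgroup association list.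
lemma inner_eq (pairs : List (String × String)) :
    (pairs.foldl (fun d q => if d.contains q.1 then d.modify q.1 [] (fun l => l ++ [q.2]) else d.insert q.1 [q.2]) PySem.Dict.empty).items
      = (PySem.List.dedup (pairs.map (·.1))).map
          (fun p => (p, (pairs.filter (fun q => q.1 == p)).map (·.2))) := by
  have hfun : (fun (d : PySem.Dict String (List String)) (q : String × String) =>
      if d.contains q.1 then d.modify q.1 [] (fun l => l ++ [q.2]) else d.insert q.1 [q.2])
      = fun d q => d.modify q.1 [] (fun l => l ++ [q.2]) := by
    funext d q; exact step_eq_modify d q.1 q.2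
  rw [hfun]
  have hnd : (pairs.foldl (fun d q => d.modify q.1 [] (fun l => l ++ [q.2])) PySem.Dict.empty).keys.Nodup :=
    PySem.Dict.nodup_keys_foldl_modify_key pairs (·.1) [] (fun d q l => l ++ [q.2]) PySem.Dict.empty
      PySem.Dict.nodup_keys_empty
  rw [PySem.Dict.items_eq_map_keys _ hnd []]
  rw [PySem.Dict.keys_foldl_modify_key]
  simp only [PySem.Dict.keys_empty, PySem.Set.update_nil_left, PySem.List.dedup_eq_ofList]
  apply List.map_congr_left
  intro p _
  rw [PySem.Dict.getD_foldl_modify_append, PySem.Dict.getD_empty]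
  simp

lemma foldl_append_map {α β : Type} (f : α → β) (l : List α) (acc : List β) :
    l.foldl (fun a x => a ++ [f x]) acc = acc ++ l.map f := by
  induction l generalizing acc with
  | nil => simp
  | cons x t ih => simp [List.foldl_cons, ih]

-- ===== VERDICT (by name: the statement is the Claim_ definition above) =====
theorem bundle_path_spec : Claim_equal_bundle_path := by
  intro egb _ _
  unfold Spec_bundle_path bundle_path bundle_path_alt
  rw [foldl_append_map]
  simp only [List.nil_append]
  apply List.map_congr_left
  intro g _
  have := inner_eq (g.map (fun pe =>
    let dpe := PySem.Dict.ofList pe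
    (dpe.values.headD "", dpe.keys.headD "")))
  rw [List.foldl_map] at this
  exact this
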